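-- pv_equiv track=rewrite | github.com/Axym-Labs/pptrain | src/pptrain/reference_parity_exporters.py | _canonicalize_symbol_sequences
-- ===== SOURCE A (Python) =====
-- from typing import Any, Callable, Sequence
--
-- def _canonicalize_symbol_sequences(
--     inputs: list[list[Any]],
--     target: list[Any],
-- ) -> tuple[list[list[int]], list[int]]:
--     symbol_ids: dict[Any, int] = {}
--
--     def encode(sequence: list[Any]) -> list[int]:
--         encoded: list[int] = []
--         for symbol in sequence:
--             if symbol not in symbol_ids:
--                 symbol_ids[symbol] = len(symbol_ids)
--             encoded.append(symbol_ids[symbol])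
--         return encoded
--
--     canonical_inputs = [encode(sequence) for sequence in inputs]
--     canonical_target = encode(target)
--     return canonical_inputs, canonical_target
-- ===== SOURCE B (Python) =====
-- def _canonicalize_symbol_sequences(inputs, target):
--     # No symbol table at all: each symbol's id is computed directly as the
--     # number of distinct symbols occurring strictly before its first
--     # occurrence in the flattened stream (inputs in order, then target).
--     flat = [s for seq in inputs for s in seq] + target
--     def sid(symbol):
--         return len(set(flat[:flat.index(symbol)]))
--     return [[sid(s) for s in seq] for seq in inputs], [sid(s) for s in target]
-- ===== Notes on version B (the rewrite author's own statement) =====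
-- stated objective: alternative
-- what changed: A incrementally builds a shared mutable symbol-id dict while encoding; B keeps no table at all and computes each id independently as len(set(flat[:flat.index(s)])) — the count of distinct symbols before the symbol's first occurrence in the flattened stream — trading A's O(n) incremental table for an O(n^2) table-free closed form.
import Mathlib
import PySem

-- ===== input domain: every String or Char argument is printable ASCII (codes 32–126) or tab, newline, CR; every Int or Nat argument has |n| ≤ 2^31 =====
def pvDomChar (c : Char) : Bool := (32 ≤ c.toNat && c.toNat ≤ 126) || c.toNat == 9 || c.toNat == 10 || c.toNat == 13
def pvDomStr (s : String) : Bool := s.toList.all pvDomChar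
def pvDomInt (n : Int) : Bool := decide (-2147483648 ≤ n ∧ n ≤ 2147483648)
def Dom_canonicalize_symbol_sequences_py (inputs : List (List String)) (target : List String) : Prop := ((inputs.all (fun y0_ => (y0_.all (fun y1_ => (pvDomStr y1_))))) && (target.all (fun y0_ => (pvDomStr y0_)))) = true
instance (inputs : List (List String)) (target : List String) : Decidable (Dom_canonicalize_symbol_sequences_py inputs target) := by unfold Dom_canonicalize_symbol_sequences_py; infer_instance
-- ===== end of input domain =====

-- B keeps no symbol table: each id is computed directly as the number of distinct
-- symbols before the symbol's first occurrence in the flattened stream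
-- (objective: alternative, table-free algorithm; not faster).

-- ===== PORT A =====
-- one step of A's inner `for symbol in sequence` loop; state = (symbol_ids, encoded)
def pvEncodeStep (st : PySem.Dict String Int × List Int) (symbol : String) :
    PySem.Dict String Int × List Int :=
  let d := if st.1.contains symbol then st.1 else st.1.insert symbol (st.1.size : Int)
  -- `encoded.append(symbol_ids[symbol])`: the key is present after the branch, so getD is exact
  (d, st.2 ++ [d.getD symbol 0])

-- A's nested helper `encode`
def pvEncode (d : PySem.Dict String Int) (sequence : List String) :
    PySem.Dict String Int × List Int :=
  sequence.foldl pvEncodeStep (d, [])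

def canonicalize_symbol_sequences_py (inputs : List (List String)) (target : List String) :
    List (List Int) × List Int :=
  -- `[encode(sequence) for sequence in inputs]`, threading the mutated symbol_ids dict
  let st := inputs.foldl
    (fun st sequence => ((pvEncode st.1 sequence).1, st.2 ++ [(pvEncode st.1 sequence).2]))
    ((PySem.Dict.empty : PySem.Dict String Int), ([] : List (List Int)))
  (st.2, (pvEncode st.1 target).2)

-- ===== PORT B =====
-- `len(set(flat[:flat.index(symbol)]))`; `flat.index` never raises here because every
-- encoded symbol occurs in flat, so the none branch is unreachable (default 0)
def pvSid (flat : List String) (s : String) : Int :=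
  match PySem.List.index? flat s with
  | some j => ((PySem.Set.ofList (PySem.List.slice flat none (some (j : Int)))).length : Int)
  | none => 0

def canonicalize_symbol_sequences_py_alt (inputs : List (List String)) (target : List String) :
    List (List Int) × List Int :=
  -- flat = [s for seq in inputs for s in seq] + target
  let flat := inputs.flatMap (fun seq => seq) ++ target
  (inputs.map (fun seq => seq.map (pvSid flat)), target.map (pvSid flat))

-- ===== PRECONDITION & SPEC =====
def Spec_canonicalize_symbol_sequences_py (inputs : List (List String)) (target : List String) (out : List (List Int) × List Int) : Prop := out = canonicalize_symbol_sequences_py_alt inputs target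
instance (inputs : List (List String)) (target : List String) (out : List (List Int) × List Int) : Decidable (Spec_canonicalize_symbol_sequences_py inputs target out) := by unfold Spec_canonicalize_symbol_sequences_py; infer_instance

-- ===== CLAIM (what is proved, stated in full; the proofs are below) =====
def Claim_equal_canonicalize_symbol_sequences_py : Prop := ∀ (inputs : List (List String)) (target : List String), Dom_canonicalize_symbol_sequences_py inputs target → Spec_canonicalize_symbol_sequences_py inputs target (canonicalize_symbol_sequences_py inputs target)

-- ===== LEMMAS AND PROOFS =====

-- ---- A-side: A's interleaved loop equals "build table by setdefault, then look up" ----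

-- pass over a sequence with `setdefault s (len d)` — the table A's branch maintains
def pvBuild (d : PySem.Dict String Int) (sequence : List String) : PySem.Dict String Int :=
  sequence.foldl (fun d s => d.setdefault s (d.size : Int)) d

-- `D extends d`: every binding of d survives in D (ids never change once assigned)
def pvExt (d D : PySem.Dict String Int) : Prop :=
  ∀ s v, d.get? s = some v → D.get? s = some v

theorem pvExt_refl (d : PySem.Dict String Int) : pvExt d d := fun _ _ h => h

theorem pvExt_trans {d e D : PySem.Dict String Int} (h1 : pvExt d e) (h2 : pvExt e D) :
    pvExt d D := fun s v h => h2 s v (h1 s v h)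

theorem pvExt_setdefault (d : PySem.Dict String Int) (k : String) (v : Int) :
    pvExt d (d.setdefault k v) := by
  intro s w h
  by_cases hs : s = k
  · subst hs
    rw [PySem.Dict.get?_setdefault_self]
    simp [h]
  · rw [PySem.Dict.get?_setdefault_of_ne _ _ hs, h]

theorem pvExt_build (d : PySem.Dict String Int) (seq : List String) :
    pvExt d (pvBuild d seq) := by
  induction seq generalizing d with
  | nil => exact pvExt_refl d
  | cons s rest ih =>
    exact pvExt_trans (pvExt_setdefault d s _) (ih _)

-- A's insert-if-absent branch IS setdefault
theorem pvEncodeStep_fst (st : PySem.Dict String Int × List Int) (s : String) :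
    (pvEncodeStep st s).1 = st.1.setdefault s (st.1.size : Int) := by
  by_cases h : st.1.contains s = true
  · rw [PySem.Dict.setdefault_of_contains _ _ h]
    simp [pvEncodeStep, h]
  · simp only [Bool.not_eq_true] at h
    rw [PySem.Dict.setdefault_of_not_contains _ _ h]
    simp [pvEncodeStep, h]

theorem pvEncodeStep_snd (st : PySem.Dict String Int × List Int) (s : String) :
    (pvEncodeStep st s).2 = st.2 ++ [(st.1.setdefault s ((st.1.size : Int))).getD s 0] := by
  by_cases h : st.1.contains s = true
  · rw [PySem.Dict.setdefault_of_contains _ _ h]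
    simp [pvEncodeStep, h]
  · simp only [Bool.not_eq_true] at h
    rw [PySem.Dict.setdefault_of_not_contains _ _ h]
    simp [pvEncodeStep, h]

-- the accumulator of the encode fold is a pure prefix
theorem pvEncode_acc (seq : List String) (d : PySem.Dict String Int) (acc : List Int) :
    seq.foldl pvEncodeStep (d, acc) = ((pvEncode d seq).1, acc ++ (pvEncode d seq).2) := by
  induction seq generalizing d acc with
  | nil => simp [pvEncode]
  | cons s rest ih =>
    have h1 := ih ((pvEncodeStep (d, acc) s).1) ((pvEncodeStep (d, acc) s).2)
    have h2 := ih ((pvEncodeStep (d, ([] : List Int)) s).1) ((pvEncodeStep (d, ([] : List Int)) s).2)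
    have hfst : (pvEncodeStep (d, acc) s).1 = (pvEncodeStep (d, ([] : List Int)) s).1 := by
      rw [pvEncodeStep_fst, pvEncodeStep_fst]
    simp only [pvEncode, List.foldl_cons] at *
    rw [h1, h2, hfst, pvEncodeStep_snd, pvEncodeStep_snd]
    simp

theorem pvEncode_fst (d : PySem.Dict String Int) (seq : List String) :
    (pvEncode d seq).1 = pvBuild d seq := by
  induction seq generalizing d with
  | nil => simp [pvEncode, pvBuild]
  | cons s rest ih =>
    simp only [pvEncode, pvBuild, List.foldl_cons]
    rw [pvEncode_acc, pvEncodeStep_fst]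
    simpa [pvEncode, pvBuild] using ih (d.setdefault s (d.size : Int))

-- a binding present in d keeps its value in any extension
theorem pvGetD_of_ext {d D : PySem.Dict String Int} (h : pvExt d D) {s : String} {v : Int}
    (hs : d.get? s = some v) : D.getD s 0 = d.getD s 0 := by
  rw [PySem.Dict.getD_eq_get?_getD, PySem.Dict.getD_eq_get?_getD, hs, h s v hs]

theorem pvSetdefault_get?_isSome (d : PySem.Dict String Int) (s : String) (v : Int) :
    ∃ w, (d.setdefault s v).get? s = some w := by
  rw [PySem.Dict.get?_setdefault_self]
  exact ⟨_, rfl⟩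

-- A's inner loop emits exactly the final-table codes
theorem pvEncode_snd (seq : List String) (d D : PySem.Dict String Int)
    (hD : pvExt (pvBuild d seq) D) :
    (pvEncode d seq).2 = seq.map (fun s => D.getD s 0) := by
  induction seq generalizing d with
  | nil => simp [pvEncode]
  | cons s rest ih =>
    have hbuild : pvBuild d (s :: rest) = pvBuild (d.setdefault s (d.size : Int)) rest := by
      simp [pvBuild]
    rw [hbuild] at hD
    simp only [pvEncode, List.foldl_cons]
    rw [pvEncode_acc, pvEncodeStep_fst, pvEncodeStep_snd]
    obtain ⟨w, hw⟩ := pvSetdefault_get?_isSome d s (d.size : Int)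
    have hext : pvExt (d.setdefault s (d.size : Int)) D :=
      pvExt_trans (pvExt_build _ rest) hD
    have hhead : (d.setdefault s (d.size : Int)).getD s 0 = D.getD s 0 :=
      (pvGetD_of_ext hext hw).symm
    simp [hhead, ih _ hD]

theorem pvExt_foldl_build (d : PySem.Dict String Int) (l : List (List String)) :
    pvExt d (l.foldl pvBuild d) := by
  induction l generalizing d with
  | nil => exact pvExt_refl d
  | cons seq rest ih =>
    exact pvExt_trans (pvExt_build d seq) (ih _)

-- A's outer loop: the dict threads as `foldl pvBuild`, each row is the final-table encoding
theorem pvOuter (l : List (List String)) (d D : PySem.Dict String Int)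
    (acc : List (List Int)) (hD : pvExt (l.foldl pvBuild d) D) :
    l.foldl
        (fun st sequence => ((pvEncode st.1 sequence).1, st.2 ++ [(pvEncode st.1 sequence).2]))
        (d, acc)
      = (l.foldl pvBuild d, acc ++ l.map (fun seq => seq.map (fun s => D.getD s 0))) := by
  induction l generalizing d acc with
  | nil => simp
  | cons seq rest ih =>
    simp only [List.foldl_cons] at hD ⊢
    have hext : pvExt (pvBuild d seq) D :=
      pvExt_trans (pvExt_foldl_build _ rest) hD
    rw [pvEncode_fst]
    rw [ih (pvBuild d seq) (acc ++ [(pvEncode d seq).2]) hD]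
    rw [pvEncode_snd seq d D hext]
    simp

-- ---- connecting the table to B's closed form ----

-- building per sequence is building over the concatenation
theorem pvBuild_singleton (d : PySem.Dict String Int) (a : String) :
    pvBuild d [a] = d.setdefault a (d.size : Int) := rfl

theorem pvBuild_append (d : PySem.Dict String Int) (x y : List String) :
    pvBuild d (x ++ y) = pvBuild (pvBuild d x) y := by
  simp [pvBuild, List.foldl_append]

theorem pvFoldl_build_flatMap (d : PySem.Dict String Int) (l : List (List String)) :
    l.foldl pvBuild d = pvBuild d (l.flatMap (fun seq => seq)) := by
  induction l generalizing d with
  | nil => simp [pvBuild]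
  | cons seq rest ih => simp [List.foldl_cons, ih, pvBuild_append]

-- the keys of the built table are the distinct symbols seen so far
theorem pvKeys_build (d : PySem.Dict String Int) (l : List String) :
    (pvBuild d l).keys = PySem.Set.update d.keys l := by
  induction l generalizing d with
  | nil => simp [pvBuild, PySem.Set.update]
  | cons s rest ih =>
    simp only [pvBuild, List.foldl_cons] at *
    rw [ih, PySem.Set.update_cons]
    by_cases h : d.contains s = true
    · rw [PySem.Dict.setdefault_of_contains _ _ h,
        PySem.Set.add_of_mem ((PySem.Dict.contains_iff_mem_keys _ _).mp h)]
    · simp only [Bool.not_eq_true] at h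
      rw [PySem.Dict.setdefault_of_not_contains _ _ h,
        PySem.Dict.keys_insert_of_not_contains _ _ h,
        PySem.Set.add_of_not_mem]
      intro hmem
      exact absurd ((PySem.Dict.contains_iff_mem_keys _ _).mpr hmem) (by simp [h])

theorem pvKeys_build_empty (l : List String) :
    (pvBuild PySem.Dict.empty l).keys = PySem.Set.ofList l := by
  rw [pvKeys_build]
  simp [PySem.Dict.keys_empty, PySem.Set.update_nil_left]

theorem pvSize_build_empty (l : List String) :
    (pvBuild PySem.Dict.empty l).size = (PySem.Set.ofList l).length := by
  have h := pvKeys_build_empty l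
  have : (pvBuild PySem.Dict.empty l).keys.length = (PySem.Set.ofList l).length := by rw [h]
  simpa [PySem.Dict.keys, PySem.Dict.size] using this

-- main characterisation: the id of s is the number of distinct symbols before
-- its first occurrence in the stream
theorem pvBuild_getD (pre suf : List String) (s : String) (hs : s ∉ pre) :
    (pvBuild PySem.Dict.empty (pre ++ s :: suf)).getD s 0
      = ((PySem.Set.ofList pre).length : Int) := by
  induction suf using List.reverseRecOn with
  | nil =>
    have hx : pre ++ [s] = pre ++ s :: [] := rfl
    rw [← hx, pvBuild_append]
    have hnc : (pvBuild PySem.Dict.empty pre).contains s = false := by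
      by_contra hc
      simp only [Bool.not_eq_false] at hc
      exact hs (by simpa [pvKeys_build_empty, PySem.Set.mem_ofList] using
        (PySem.Dict.contains_iff_mem_keys _ _).mp hc)
    rw [pvBuild_singleton, PySem.Dict.setdefault_of_not_contains _ _ hnc,
      PySem.Dict.getD_insert_self, pvSize_build_empty]
  | append_singleton t a ih =>
    have hx : pre ++ s :: (t ++ [a]) = (pre ++ s :: t) ++ [a] := by simp
    rw [hx, pvBuild_append, pvBuild_singleton]
    have hmem : s ∈ (pvBuild PySem.Dict.empty (pre ++ s :: t)).keys := by
      rw [pvKeys_build_empty]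
      simp [PySem.Set.mem_ofList]
    by_cases hsa : a = s
    · subst hsa
      rw [PySem.Dict.setdefault_of_contains _ _ ((PySem.Dict.contains_iff_mem_keys _ _).mpr hmem)]
      exact ih
    · rw [PySem.Dict.getD_eq_get?_getD,
        PySem.Dict.get?_setdefault_of_ne _ _ (fun h => hsa h.symm),
        ← PySem.Dict.getD_eq_get?_getD]
      exact ih

-- B's closed form computes the same number
theorem pvSid_eq (pre suf : List String) (s : String) (hs : s ∉ pre) :
    pvSid (pre ++ s :: suf) s = ((PySem.Set.ofList pre).length : Int) := by
  have hidx : PySem.List.index? (pre ++ s :: suf) s = some pre.length :=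
    (PySem.List.index?_eq_some_iff _ _ _).mpr ⟨pre, suf, rfl, rfl, hs⟩
  simp only [pvSid, hidx]
  rw [PySem.List.slice_to_natCast]
  rw [List.take_append_of_le_length (Nat.le_refl _)]
  simp

-- for any symbol of the stream, table lookup = B's closed form
theorem pvGetD_eq_sid (flat : List String) (s : String) (hs : s ∈ flat) :
    (pvBuild PySem.Dict.empty flat).getD s 0 = pvSid flat s := by
  obtain ⟨k, hk⟩ : ∃ k, PySem.List.index? flat s = some k := by
    have := (PySem.List.index?_isSome_iff flat s).mpr hs
    exact Option.isSome_iff_exists.mp this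
  obtain ⟨pre, suf, rfl, -, hpre⟩ := (PySem.List.index?_eq_some_iff _ _ _).mp hk
  rw [pvBuild_getD pre suf s hpre, pvSid_eq pre suf s hpre]

-- ===== VERDICT (by name: the statement is the Claim_ definition above) =====
theorem canonicalize_symbol_sequences_py_spec : Claim_equal_canonicalize_symbol_sequences_py := by
  intro inputs target _
  unfold Spec_canonicalize_symbol_sequences_py
  unfold canonicalize_symbol_sequences_py canonicalize_symbol_sequences_py_alt
  have hD : pvExt (inputs.foldl pvBuild PySem.Dict.empty)
      (pvBuild (inputs.foldl pvBuild PySem.Dict.empty) target) := pvExt_build _ target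
  rw [pvOuter inputs PySem.Dict.empty _ [] hD]
  simp only [List.nil_append]
  rw [pvEncode_snd target (inputs.foldl pvBuild PySem.Dict.empty) _ (pvExt_refl _)]
  have hDflat : pvBuild (inputs.foldl pvBuild PySem.Dict.empty) target
      = pvBuild PySem.Dict.empty (inputs.flatMap (fun seq => seq) ++ target) := by
    rw [pvBuild_append, pvFoldl_build_flatMap]
  have hmap : ∀ (seq : List String),
      (∀ x ∈ seq, x ∈ inputs.flatMap (fun s => s) ++ target) →
      seq.map (fun s => (pvBuild (inputs.foldl pvBuild PySem.Dict.empty) target).getD s 0)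
        = seq.map (pvSid (inputs.flatMap (fun s => s) ++ target)) := by
    intro seq hsub
    apply List.map_congr_left
    intro s hsmem
    rw [hDflat]
    exact pvGetD_eq_sid _ s (hsub s hsmem)
  have h1 : inputs.map (fun seq =>
        seq.map (fun s => (pvBuild (inputs.foldl pvBuild PySem.Dict.empty) target).getD s 0))
      = inputs.map (fun seq => seq.map (pvSid (inputs.flatMap (fun s => s) ++ target))) := by
    apply List.map_congr_left
    intro seq hseq
    exact hmap seq (fun x hx =>
      List.mem_append_left _ (List.mem_flatMap.mpr ⟨seq, hseq, hx⟩))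
  have h2 := hmap target (fun x hx => List.mem_append_right _ hx)
  rw [h1, h2]
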